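-- pv_equiv track=rewrite | github.com/Dhanudino117/Dojo-5th-Belt | Python/Palindrome/palindrome.py | is_rotated_palindrome
-- ===== SOURCE A (Python) =====
-- def is_rotated_palindrome(s):
--     n = len(s)
--     double = s+s
--     def is_palindrome(sub):
--         return sub == sub[::-1]
--     for i in range(n):
--         if is_palindrome(double[i:i+n]):
--             return "Yes the rotated string is a palindrome"
--     return "No, the rotated string is not a palindrome"
-- ===== SOURCE B (Python) =====
-- def is_rotated_palindrome(s):
--     n = len(s)
--     for i in range(n):
--         if all(s[(i + j) % n] == s[(n + i - 1 - j) % n] for j in range(n // 2)):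
--             return "Yes the rotated string is a palindrome"
--     return "No, the rotated string is not a palindrome"
-- ===== Notes on version B (the rewrite author's own statement) =====
-- stated objective: alternative
-- what changed: Instead of materialising each rotation as a slice of s+s and comparing it with its reversed copy, B checks each rotation in place with an early-exiting half-length two-pointer comparison using modular indices, allocating no intermediate strings.
import Mathlib
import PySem

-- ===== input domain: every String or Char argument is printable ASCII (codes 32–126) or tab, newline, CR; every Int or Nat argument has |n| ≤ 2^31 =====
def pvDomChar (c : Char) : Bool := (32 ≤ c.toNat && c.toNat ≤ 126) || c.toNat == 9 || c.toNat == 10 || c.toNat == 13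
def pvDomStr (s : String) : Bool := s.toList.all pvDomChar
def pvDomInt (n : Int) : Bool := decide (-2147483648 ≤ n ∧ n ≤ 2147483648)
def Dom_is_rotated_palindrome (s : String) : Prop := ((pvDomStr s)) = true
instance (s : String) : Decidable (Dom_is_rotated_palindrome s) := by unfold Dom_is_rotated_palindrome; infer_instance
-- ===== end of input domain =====

-- B replaces A's slice-and-reverse check of each rotation of s by an in-place
-- early-exiting half-length modular-index comparison (objective: alternative; no intermediate strings).

def pvYes : String := "Yes the rotated string is a palindrome"
def pvNo : String := "No, the rotated string is not a palindrome"

-- ===== PORT A =====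
-- is_palindrome(sub): sub == sub[::-1]  (sub[::-1] is exactly List.reverse)
def pvIsPalA (sub : List Char) : Bool := sub == sub.reverse

-- the 'for i in range(n): if … return' loop, early return as recursion
def pvLoopA (double : List Char) (n : Int) : List Int → String
  | [] => pvNo
  | i :: rest =>
    if pvIsPalA (PySem.List.slice double (some i) (some (i + n))) then pvYes
    else pvLoopA double n rest

def is_rotated_palindrome (s : String) : String :=
  let n : Int := (s.toList.length : Int)
  let double := s.toList ++ s.toList
  pvLoopA double n (PySem.List.pyRange 0 n 1)

-- ===== PORT B =====
-- all(s[(i+j) % n] == s[(n+i-1-j) % n] for j in range(n // 2)), early exit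
def pvHalfB (l : List Char) (n i : Nat) : List Nat → Bool
  | [] => true
  | j :: rest =>
    l.getD ((i + j) % n) 'a' == l.getD ((n + i - 1 - j) % n) 'a' && pvHalfB l n i rest

def pvLoopB (l : List Char) (n : Nat) : List Nat → String
  | [] => pvNo
  | i :: rest => if pvHalfB l n i (List.range (n / 2)) then pvYes else pvLoopB l n rest

def is_rotated_palindrome_alt (s : String) : String :=
  let l := s.toList
  let n := l.length
  pvLoopB l n (List.range n)

-- ===== PRECONDITION & SPEC =====
def Spec_is_rotated_palindrome (s : String) (out : String) : Prop := out = is_rotated_palindrome_alt s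
instance (s : String) (out : String) : Decidable (Spec_is_rotated_palindrome s out) := by unfold Spec_is_rotated_palindrome; infer_instance

-- ===== CLAIM (what is proved, stated in full; the proofs are below) =====
def Claim_equal_is_rotated_palindrome : Prop := ∀ (s : String), Dom_is_rotated_palindrome s → Spec_is_rotated_palindrome s (is_rotated_palindrome s)

-- ===== LEMMAS AND PROOFS =====

-- the rotation A slices out of l ++ l: element j is l[(i+j) % n]
lemma pv_sub_getD (l : List Char) (i j : Nat) (hi : i < l.length) (hj : j < l.length) (d : Char) :
    ((((l ++ l).drop i).take l.length).getD j d) = l.getD ((i + j) % l.length) d := by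
  rw [List.getD_eq_getElem?_getD, List.getD_eq_getElem?_getD, List.getElem?_take_of_lt hj]
  rw [List.getElem?_drop]
  by_cases h : i + j < l.length
  · rw [List.getElem?_append_left h, Nat.mod_eq_of_lt h]
  · rw [List.getElem?_append_right (by omega)]
    have : (i + j) % l.length = i + j - l.length := by
      rw [Nat.mod_eq_sub_mod (by omega), Nat.mod_eq_of_lt (by omega)]
    rw [this]

lemma pv_sub_length (l : List Char) (i : Nat) (hi : i < l.length) :
    (((l ++ l).drop i).take l.length).length = l.length := by
  simp; omega

-- half-length pair condition ⇔ full palindrome condition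
lemma pv_pal_iff_half (t : List Char) :
    (t == t.reverse) = true ↔ ∀ j < t.length / 2, t.getD j 'a' = t.getD (t.length - 1 - j) 'a' := by
  rw [beq_iff_eq]
  constructor
  · intro h j hj
    conv_lhs => rw [h]
    rw [List.getD_eq_getElem?_getD, List.getD_eq_getElem?_getD, List.getElem?_reverse (by omega)]
  · intro h
    apply List.ext_getElem (by simp)
    intro j h1 h2
    rw [List.getElem_reverse]
    by_cases hj : j < t.length / 2
    · have := h j hj
      rw [List.getD_eq_getElem?_getD, List.getD_eq_getElem?_getD,
        List.getElem?_eq_getElem h1, List.getElem?_eq_getElem (by omega)] at this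
      simpa using this
    · by_cases hm : t.length - 1 - j = j
      · exact getElem_congr_idx hm.symm
      · have hk : t.length - 1 - j < t.length / 2 := by omega
        have := h _ hk
        rw [List.getD_eq_getElem?_getD, List.getD_eq_getElem?_getD,
          List.getElem?_eq_getElem (by omega), List.getElem?_eq_getElem (by omega)] at this
        have he : t.length - 1 - (t.length - 1 - j) = j := by omega
        simp only [he] at this
        simpa using this.symm

lemma pvHalfB_iff (l : List Char) (n i : Nat) (js : List Nat) :
    pvHalfB l n i js = true ↔
      ∀ j ∈ js, l.getD ((i + j) % n) 'a' = l.getD ((n + i - 1 - j) % n) 'a' := by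
  induction js with
  | nil => simp [pvHalfB]
  | cons j rest ih => simp [pvHalfB, ih]

-- per-rotation equivalence of the two checks
lemma pv_cond_eq (l : List Char) (i : Nat) (hi : i < l.length) :
    pvIsPalA (PySem.List.slice (l ++ l) (some (i : Int)) (some ((i : Int) + (l.length : Int)))) =
      pvHalfB l l.length i (List.range (l.length / 2)) := by
  rw [PySem.List.slice_natCast_add]
  rw [Bool.eq_iff_iff]
  set t := ((l ++ l).drop i).take l.length with ht
  have hlen : t.length = l.length := pv_sub_length l i hi
  rw [pvIsPalA, pv_pal_iff_half t, pvHalfB_iff]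
  simp only [hlen, List.mem_range]
  constructor
  · intro h j hj
    have := h j hj
    rw [pv_sub_getD l i j hi (by omega), pv_sub_getD l i (l.length - 1 - j) hi (by omega)] at this
    have he : i + (l.length - 1 - j) = l.length + i - 1 - j := by omega
    rw [he] at this
    exact this
  · intro h j hj
    have := h j hj
    rw [pv_sub_getD l i j hi (by omega), pv_sub_getD l i (l.length - 1 - j) hi (by omega)]
    have he : i + (l.length - 1 - j) = l.length + i - 1 - j := by omega
    rw [he]
    exact this

lemma pv_loops_eq (l : List Char) (is : List Nat) (h : ∀ i ∈ is, i < l.length) :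
    pvLoopA (l ++ l) (l.length : Int) (is.map (Nat.cast)) = pvLoopB l l.length is := by
  induction is with
  | nil => simp [pvLoopA, pvLoopB]
  | cons i rest ih =>
    have hi : i < l.length := h i (by simp)
    simp only [List.map_cons, pvLoopA, pvLoopB, pv_cond_eq l i hi]
    split <;> simp_all

-- ===== VERDICT (by name: the statement is the Claim_ definition above) =====
theorem is_rotated_palindrome_spec : Claim_equal_is_rotated_palindrome := by
  intro s _
  unfold Spec_is_rotated_palindrome is_rotated_palindrome is_rotated_palindrome_alt
  have h := pv_loops_eq s.toList (List.range s.toList.length) (by simp)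
  rw [← h]
  simp only [PySem.List.pyRange_zero_natCast]
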